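-- pv_equiv track=rewrite | github.com/Anonymous3105/WebMiningTutorial | 04 - PageRanking Algorithm/PageRanker.py | maptodictmat
-- ===== SOURCE A (Python) =====
-- def maptodictmat(nodemap):
-- 	n = len(nodemap.keys())
-- 	sitemat = {k: [0 for j in range(n)] for k in sorted(nodemap.keys())}
-- 	for k1 in sorted(nodemap.keys()):
-- 		for j, k2 in enumerate(sorted(nodemap.keys())):
-- 			if k2 in nodemap[k1]:
-- 				sitemat[k1][j] = 1
--
-- 	return sitemat
-- ===== SOURCE B (Python) =====
-- def maptodictmat(nodemap):
-- 	skeys = sorted(nodemap)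
-- 	n = len(skeys)
-- 	idx = {k: j for j, k in enumerate(skeys)}
-- 	sitemat = {}
-- 	for k in skeys:
-- 		row = [0] * n
-- 		for nb in nodemap[k]:
-- 			j = idx.get(nb)
-- 			if j is not None:
-- 				row[j] = 1
-- 		sitemat[k] = row
-- 	return sitemat
-- ===== Notes on version B (the rewrite author's own statement) =====
-- stated objective: faster
-- what changed: A re-sorts the keys for every row and scans all n keys per row doing an O(deg) membership test each (O(n^2*deg)); B sorts once, builds a key->index dict once, and for each node scatters 1s only at its neighbours' indices into a zero row (O(n log n + n^2 + edges)).
import Mathlib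
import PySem

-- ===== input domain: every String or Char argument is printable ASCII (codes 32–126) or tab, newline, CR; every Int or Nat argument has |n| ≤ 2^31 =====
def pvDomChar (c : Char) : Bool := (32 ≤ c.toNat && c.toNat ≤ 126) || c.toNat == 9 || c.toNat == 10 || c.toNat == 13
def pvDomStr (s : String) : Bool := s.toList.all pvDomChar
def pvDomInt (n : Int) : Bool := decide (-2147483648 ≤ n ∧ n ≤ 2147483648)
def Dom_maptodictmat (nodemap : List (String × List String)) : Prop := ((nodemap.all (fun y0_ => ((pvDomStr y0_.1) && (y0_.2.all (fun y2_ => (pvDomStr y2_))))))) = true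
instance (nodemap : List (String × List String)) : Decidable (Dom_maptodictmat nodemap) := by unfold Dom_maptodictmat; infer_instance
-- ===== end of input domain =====

-- B sorts the keys and builds a key→index dict ONCE, then for each node scatters 1s at its
-- neighbours' indices into a fresh zero row, instead of A's per-row re-sort and full scan of
-- all keys with a membership test each (measured faster; asymptotic mechanism).

-- ===== PORT A =====
def maptodictmat (nodemap : List (String × List String)) : List (String × List Int) :=
  let n : Int := (nodemap.map (·.1)).length
  let sitemat0 : PySem.Dict String (List Int) :=
    (PySem.List.sorted (nodemap.map (·.1)) (fun k => k) false).foldl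
      (fun d k => d.insert k ((PySem.List.pyRange 0 n 1).map (fun _ => (0 : Int))))
      PySem.Dict.empty
  let sitemat :=
    (PySem.List.sorted (nodemap.map (·.1)) (fun k => k) false).foldl
      (fun d k1 =>
        (PySem.List.enumerate (PySem.List.sorted (nodemap.map (·.1)) (fun k => k) false) 0).foldl
          (fun d jk =>
            if jk.2 ∈ (PySem.Dict.mk nodemap).getD k1 [] then
              -- sitemat[k1][j] = 1 : j = jk.1 is an enumerate index, always 0 ≤ j < row length
              d.modify k1 [] (fun row => row.set jk.1.toNat 1)
            else d)
          d)
      sitemat0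
  sitemat.items

-- ===== PORT B =====
def maptodictmat_alt (nodemap : List (String × List String)) : List (String × List Int) :=
  let skeys := PySem.List.sorted (nodemap.map (·.1)) (fun k => k) false
  let n := skeys.length
  let idx : PySem.Dict String Int :=
    (PySem.List.enumerate skeys 0).foldl (fun d jk => d.insert jk.2 jk.1) PySem.Dict.empty
  let sitemat : PySem.Dict String (List Int) :=
    skeys.foldl
      (fun d k =>
        d.insert k
          (((PySem.Dict.mk nodemap).getD k []).foldl
            (fun row nb =>
              match idx.get? nb with
              | some j => row.set j.toNat 1   -- row[j] = 1 ; idx values are valid indices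
              | none => row)
            (List.replicate n 0)))
      PySem.Dict.empty
  sitemat.items

-- ===== PRECONDITION & SPEC =====
-- Pre_ excludes only association lists with duplicate keys: those do not represent any Python
-- dict (the Python argument is a dict, whose keys are unique), so nothing of A's Python domain
-- is excluded.
def Pre_maptodictmat (nodemap : List (String × List String)) : Prop :=
  (nodemap.map (·.1)).Nodup
instance (nodemap : List (String × List String)) : Decidable (Pre_maptodictmat nodemap) := by
  unfold Pre_maptodictmat; infer_instance
def pvWitness_maptodictmat : (List (String × List String)) :=
  [("a", ["b", "c"]), ("b", []), ("c", ["a"])]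
def Spec_maptodictmat (nodemap : List (String × List String)) (out : List (String × List Int)) : Prop := out = maptodictmat_alt nodemap
instance (nodemap : List (String × List String)) (out : List (String × List Int)) : Decidable (Spec_maptodictmat nodemap out) := by unfold Spec_maptodictmat; infer_instance

-- ===== CLAIM (what is proved, stated in full; the proofs are below) =====
def Claim_equal_maptodictmat : Prop := ∀ (nodemap : List (String × List String)), Dom_maptodictmat nodemap → Pre_maptodictmat nodemap → Spec_maptodictmat nodemap (maptodictmat nodemap)

-- ===== LEMMAS AND PROOFS =====

def pvSkeys (nodemap : List (String × List String)) : List String :=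
  PySem.List.sorted (nodemap.map (·.1)) (fun k => k) false

def pvNbrs (nodemap : List (String × List String)) (k : String) : List String :=
  (PySem.Dict.mk nodemap).getD k []

def pvIdx (nodemap : List (String × List String)) : PySem.Dict String Int :=
  (PySem.List.enumerate (pvSkeys nodemap) 0).foldl (fun d jk => d.insert jk.2 jk.1) PySem.Dict.empty

-- length of A's row fold
lemma pvLenA (p : String → Prop) [DecidablePred p] (l : List (Int × String)) (row : List Int) :
    (l.foldl (fun row jk => if p jk.2 then row.set jk.1.toNat 1 else row) row).length = row.length := by
  induction l generalizing row with
  | nil => rfl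
  | cons jk t ih => simp only [List.foldl_cons]; rw [ih]; split <;> simp

-- entrywise value of A's row fold over enumerate
lemma pvGetA (p : String → Prop) [DecidablePred p] (l : List String) (s : Nat) (row : List Int) (i : Nat) :
    ((PySem.List.enumerate l (s : Int)).foldl
        (fun row jk => if p jk.2 then row.set jk.1.toNat 1 else row) row)[i]? =
      if h : s ≤ i ∧ i - s < l.length then
        (if p (l[i - s]'h.2) then row[i]?.map (fun _ => (1 : Int)) else row[i]?)
      else row[i]? := by
  induction l generalizing s row with
  | nil => simp [PySem.List.enumerate_nil]
  | cons k t ih =>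
      rw [PySem.List.enumerate_cons]
      simp only [List.foldl_cons]
      have hc : ((s : Int) + 1) = ((s + 1 : Nat) : Int) := by push_cast; ring
      rw [hc, ih]
      have hnat : ((s : Int)).toNat = s := Int.toNat_natCast s
      by_cases hi : i = s
      · subst hi
        have h1 : ¬ (i + 1 ≤ i ∧ i - (i + 1) < t.length) := by omega
        have h2 : i ≤ i ∧ i - i < (k :: t).length := ⟨Nat.le_refl i, by simp⟩
        rw [dif_neg h1, dif_pos h2]
        have : (k :: t)[i - i]'h2.2 = k := by simp
        rw [this, hnat]
        by_cases hp : p k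
        · rw [if_pos hp, if_pos hp, List.getElem?_set]
          simp
          rcases Nat.lt_or_ge i row.length with h | h
          · simp [h]
          · simp [h]
        · rw [if_neg hp, if_neg hp]
      · have hrow' : (if p k then row.set ((s:Int)).toNat 1 else row)[i]? = row[i]? := by
          split
          · rw [hnat, List.getElem?_set, if_neg (by omega)]
          · rfl
        rw [hrow']
        by_cases hs : s + 1 ≤ i ∧ i - (s + 1) < t.length
        · have hs' : s ≤ i ∧ i - s < (k :: t).length := by simp; omega
          rw [dif_pos hs, dif_pos hs']
          have : (k :: t)[i - s]'hs'.2 = t[i - (s + 1)]'hs.2 := by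
            have h1 : i - s = (i - (s + 1)) + 1 := by omega
            simp [h1]
          rw [this]
        · have hs' : ¬ (s ≤ i ∧ i - s < (k :: t).length) := by simp; omega
          rw [dif_neg hs, dif_neg hs']

-- A's inner dict fold: all writes hit key k1
lemma pvInnerD (p : String → Prop) [DecidablePred p] (k1 : String)
    (l : List (Int × String)) (d : PySem.Dict String (List Int)) (k' : String) :
    (l.foldl (fun d jk => if p jk.2 then d.modify k1 [] (fun row => row.set jk.1.toNat 1) else d) d).getD k' []
      = if k' = k1 then
          l.foldl (fun row jk => if p jk.2 then row.set jk.1.toNat 1 else row) (d.getD k1 [])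
        else d.getD k' [] := by
  induction l generalizing d with
  | nil => simp only [List.foldl_nil]; split <;> simp_all
  | cons jk t ih =>
      simp only [List.foldl_cons]
      by_cases hp : p jk.2
      · rw [if_pos hp, if_pos hp, ih, PySem.Dict.getD_modify, PySem.Dict.getD_modify]
        by_cases h : k' = k1 <;> simp [h]
      · rw [if_neg hp, if_neg hp, ih]

lemma pvInnerKeys (p : String → Prop) [DecidablePred p] (k1 : String)
    (l : List (Int × String)) (d : PySem.Dict String (List Int)) (hc : d.contains k1 = true) :
    (l.foldl (fun d jk => if p jk.2 then d.modify k1 [] (fun row => row.set jk.1.toNat 1) else d) d).keys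
      = d.keys := by
  induction l generalizing d with
  | nil => rfl
  | cons jk t ih =>
      simp only [List.foldl_cons]
      by_cases hp : p jk.2
      · rw [if_pos hp, ih]
        · rw [PySem.Dict.keys_modify, PySem.Dict.keys_insert_of_contains _ _ hc]
        · rw [PySem.Dict.contains_modify]; simp [hc]
      · rw [if_neg hp]; exact ih d hc

-- A's outer fold
lemma pvOuterD (P : String → String → Prop) [∀ a, DecidablePred (P a)] (l : List (Int × String))
    (ks : List String) (d : PySem.Dict String (List Int)) (hnd : ks.Nodup)
    (hc : ∀ k ∈ ks, d.contains k = true) :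
    (∀ k', (ks.foldl (fun d k1 =>
        l.foldl (fun d jk => if P k1 jk.2 then d.modify k1 [] (fun row => row.set jk.1.toNat 1) else d) d)
        d).getD k' []
      = if k' ∈ ks then
          l.foldl (fun row jk => if P k' jk.2 then row.set jk.1.toNat 1 else row) (d.getD k' [])
        else d.getD k' [])
    ∧ (ks.foldl (fun d k1 =>
        l.foldl (fun d jk => if P k1 jk.2 then d.modify k1 [] (fun row => row.set jk.1.toNat 1) else d) d)
        d).keys = d.keys := by
  induction ks generalizing d with
  | nil => simp
  | cons k1 t ih =>
      have hc1 : d.contains k1 = true := hc k1 (by simp)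
      have hkeys1 := pvInnerKeys (P k1) k1 l d hc1
      have hcont : ∀ x, ∀ dd : PySem.Dict String (List Int), dd.keys = d.keys →
          (dd.contains x = d.contains x) := by
        intro x dd h
        by_cases hx : d.contains x = true
        · rw [hx, (PySem.Dict.contains_iff_mem_keys _ _).mpr]
          rw [h]; exact (PySem.Dict.contains_iff_mem_keys _ _).mp hx
        · simp only [Bool.not_eq_true] at hx
          rw [hx]
          by_contra hcontra
          simp only [Bool.not_eq_false] at hcontra
          have := (PySem.Dict.contains_iff_mem_keys _ _).mp hcontra
          rw [h] at this
          rw [(PySem.Dict.contains_iff_mem_keys _ _).mpr this] at hx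
          exact absurd hx (by simp)
      simp only [List.foldl_cons]
      set d1 := l.foldl (fun d jk => if P k1 jk.2 then d.modify k1 [] (fun row => row.set jk.1.toNat 1) else d) d with hd1
      have hc' : ∀ k ∈ t, d1.contains k = true := by
        intro k hk; rw [hcont k d1 hkeys1]; exact hc k (by simp [hk])
      obtain ⟨hget, hkeys⟩ := ih d1 (by exact hnd.of_cons) hc'
      constructor
      · intro k'
        rw [hget k']
        have hgd1 : ∀ x, d1.getD x [] = if x = k1 then
            l.foldl (fun row jk => if P k1 jk.2 then row.set jk.1.toNat 1 else row) (d.getD k1 [])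
          else d.getD x [] := fun x => pvInnerD (P k1) k1 l d x
        by_cases hk' : k' ∈ t
        · have hne : k' ≠ k1 := by
            rintro rfl; exact (List.nodup_cons.mp hnd).1 hk'
          rw [if_pos hk', if_pos (by simp [hk']), hgd1, if_neg hne]
        · rw [if_neg hk', hgd1]
          by_cases he : k' = k1
          · subst he; rw [if_pos rfl, if_pos (by simp)]
          · rw [if_neg he, if_neg (by simp [he, hk'])]
      · rw [hkeys, hkeys1]

-- ===== B side =====
lemma pvIdxItems (nodemap : List (String × List String)) (hnd : (pvSkeys nodemap).Nodup) :
    (pvIdx nodemap).items = (PySem.List.enumerate (pvSkeys nodemap) 0).map (fun jk => (jk.2, jk.1)) := by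
  unfold pvIdx
  have h := PySem.Dict.items_foldl_insert_fresh (PySem.List.enumerate (pvSkeys nodemap) 0)
      (fun jk : Int × String => jk.2) (fun jk : Int × String => jk.1) PySem.Dict.empty
      (fun a _ => PySem.Dict.contains_empty a.2)
      (by rw [PySem.List.map_snd_enumerate]; exact hnd)
  rw [h]
  simp [PySem.Dict.empty]

lemma pvIdxKeys (nodemap : List (String × List String)) (hnd : (pvSkeys nodemap).Nodup) :
    (pvIdx nodemap).keys = pvSkeys nodemap := by
  have h := congrArg (List.map (fun p : String × Int => p.1)) (pvIdxItems nodemap hnd)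
  simp only [List.map_map] at h
  calc (pvIdx nodemap).keys = (pvIdx nodemap).items.map (fun p => p.1) := rfl
    _ = pvSkeys nodemap := by rw [h]; exact PySem.List.map_snd_enumerate _ _

lemma pvIdxGetSome (nodemap : List (String × List String)) (hnd : (pvSkeys nodemap).Nodup)
    {nb : String} {j : Int} (h : (pvIdx nodemap).get? nb = some j) :
    ∃ (t : Nat) (ht : t < (pvSkeys nodemap).length), (pvSkeys nodemap)[t] = nb ∧ j = (t : Int) := by
  have hk : (pvIdx nodemap).keys.Nodup := by rw [pvIdxKeys nodemap hnd]; exact hnd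
  have hm := (PySem.Dict.get?_eq_some_iff_mem_items _ _ _ hk).mp h
  rw [pvIdxItems nodemap hnd] at hm
  obtain ⟨jk, hjk, he⟩ := List.mem_map.mp hm
  obtain ⟨t, ht, rfl⟩ := (PySem.List.mem_enumerate_iff _ _ _).mp hjk
  refine ⟨t, ht, ?_, ?_⟩
  · exact congrArg Prod.fst he
  · have := congrArg Prod.snd he; simp at this ⊢; omega

lemma pvIdxGetIdx (nodemap : List (String × List String)) (hnd : (pvSkeys nodemap).Nodup)
    {i : Nat} (hi : i < (pvSkeys nodemap).length) :
    (pvIdx nodemap).get? ((pvSkeys nodemap)[i]) = some (i : Int) := by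
  have hk : (pvIdx nodemap).keys.Nodup := by rw [pvIdxKeys nodemap hnd]; exact hnd
  rw [PySem.Dict.get?_eq_some_iff_mem_items _ _ _ hk, pvIdxItems nodemap hnd]
  refine List.mem_map.mpr ⟨((i : Int), (pvSkeys nodemap)[i]), ?_, rfl⟩
  exact (PySem.List.mem_enumerate_iff _ _ _).mpr ⟨i, hi, by simp⟩

lemma pvLenB (nodemap : List (String × List String)) (nbl : List String) (row : List Int) :
    (nbl.foldl (fun row nb => match (pvIdx nodemap).get? nb with
        | some j => row.set j.toNat 1 | none => row) row).length = row.length := by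
  induction nbl generalizing row with
  | nil => rfl
  | cons nb t ih =>
      simp only [List.foldl_cons]; rw [ih]
      cases (pvIdx nodemap).get? nb <;> simp

-- (b): an index whose key is not among the scattered neighbours is untouched
lemma pvGetB_not (nodemap : List (String × List String)) (hnd : (pvSkeys nodemap).Nodup)
    (nbl : List String) (row : List Int) (i : Nat) (hi : i < (pvSkeys nodemap).length)
    (hm : (pvSkeys nodemap)[i] ∉ nbl) :
    (nbl.foldl (fun row nb => match (pvIdx nodemap).get? nb with
        | some j => row.set j.toNat 1 | none => row) row)[i]? = row[i]? := by
  induction nbl generalizing row with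
  | nil => rfl
  | cons nb t ih =>
      simp only [List.foldl_cons]
      have hnb : (pvSkeys nodemap)[i] ≠ nb := fun h => hm (by simp [h])
      have ht : (pvSkeys nodemap)[i] ∉ t := fun h => hm (by simp [h])
      rw [ih _ ht]
      cases hg : (pvIdx nodemap).get? nb with
      | none => rfl
      | some j =>
          obtain ⟨t', ht', hkey, rfl⟩ := pvIdxGetSome nodemap hnd hg
          have : t' ≠ i := by rintro rfl; exact hnb hkey
          simp only []
          rw [List.getElem?_set, if_neg (by simpa using this)]

-- (a): an index whose key is a scattered neighbour ends at 1
lemma pvGetB_mem (nodemap : List (String × List String)) (hnd : (pvSkeys nodemap).Nodup)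
    (nbl : List String) (row : List Int) (hlen : row.length = (pvSkeys nodemap).length)
    (i : Nat) (hi : i < (pvSkeys nodemap).length) (hm : (pvSkeys nodemap)[i] ∈ nbl) :
    (nbl.foldl (fun row nb => match (pvIdx nodemap).get? nb with
        | some j => row.set j.toNat 1 | none => row) row)[i]? = some 1 := by
  induction nbl generalizing row with
  | nil => simp at hm
  | cons nb t ih =>
      simp only [List.foldl_cons]
      by_cases htm : (pvSkeys nodemap)[i] ∈ t
      · apply ih
        cases (pvIdx nodemap).get? nb <;> simp [hlen]
        exact htm
      · have hnb : (pvSkeys nodemap)[i] = nb := by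
          rcases List.mem_cons.mp hm with h | h
          · exact h
          · exact absurd h htm
        have hg : (pvIdx nodemap).get? nb = some (i : Int) := by
          rw [← hnb]; exact pvIdxGetIdx nodemap hnd hi
        rw [pvGetB_not nodemap hnd t _ i hi htm]
        simp only [hg, Int.toNat_natCast]
        rw [List.getElem?_set, if_pos rfl, if_pos (by omega)]

-- the two row computations agree
lemma pvRowEq (nodemap : List (String × List String)) (hnd : (pvSkeys nodemap).Nodup) (k : String) :
    (PySem.List.enumerate (pvSkeys nodemap) 0).foldl
        (fun row jk => if jk.2 ∈ pvNbrs nodemap k then row.set jk.1.toNat 1 else row)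
        (List.replicate (pvSkeys nodemap).length (0 : Int))
      = (pvNbrs nodemap k).foldl
          (fun row nb => match (pvIdx nodemap).get? nb with
            | some j => row.set j.toNat 1 | none => row)
          (List.replicate (pvSkeys nodemap).length (0 : Int)) := by
  apply List.ext_getElem?
  intro i
  by_cases hi : i < (pvSkeys nodemap).length
  · have ha := pvGetA (fun k2 => k2 ∈ pvNbrs nodemap k) (pvSkeys nodemap) 0
        (List.replicate (pvSkeys nodemap).length (0 : Int)) i
    norm_num at ha
    rw [ha]
    by_cases hm : (pvSkeys nodemap)[i] ∈ pvNbrs nodemap k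
    · rw [dif_pos hi, pvGetB_mem nodemap hnd _ _ (by simp) i hi hm,
        if_pos hm, List.getElem?_replicate, if_pos hi]
      rfl
    · rw [dif_pos hi, pvGetB_not nodemap hnd _ _ i hi hm, if_neg hm]
  · rw [List.getElem?_eq_none, List.getElem?_eq_none]
    · rw [pvLenB]; simpa using Nat.le_of_not_lt hi
    · rw [pvLenA]; simpa using Nat.le_of_not_lt hi
lemma pvBeq (nodemap : List (String × List String)) (hnd : (pvSkeys nodemap).Nodup) :
    maptodictmat_alt nodemap = (pvSkeys nodemap).map (fun k => (k,
      (pvNbrs nodemap k).foldl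
        (fun row nb => match (pvIdx nodemap).get? nb with
          | some j => row.set j.toNat 1 | none => row)
        (List.replicate (pvSkeys nodemap).length (0 : Int)))) := by
  show (List.foldl (fun d k =>
      d.insert k ((pvNbrs nodemap k).foldl
        (fun row nb => match (pvIdx nodemap).get? nb with
          | some j => row.set j.toNat 1 | none => row)
        (List.replicate (pvSkeys nodemap).length (0 : Int))))
      PySem.Dict.empty (pvSkeys nodemap)).items = _
  rw [PySem.Dict.items_foldl_insert_fresh (pvSkeys nodemap) (fun k => k) _ PySem.Dict.empty
      (fun a _ => PySem.Dict.contains_empty a) (by simpa using hnd)]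
  simp [PySem.Dict.empty]

lemma pvAeq (nodemap : List (String × List String)) (hnd0 : (nodemap.map (·.1)).Nodup) :
    maptodictmat nodemap = (pvSkeys nodemap).map (fun k => (k,
      (PySem.List.enumerate (pvSkeys nodemap) 0).foldl
        (fun row jk => if jk.2 ∈ pvNbrs nodemap k then row.set jk.1.toNat 1 else row)
        (List.replicate (pvSkeys nodemap).length (0 : Int)))) := by
  have hnd : (pvSkeys nodemap).Nodup := (PySem.List.sorted_perm _ _ _).nodup_iff.mpr hnd0
  have hrow0 : (PySem.List.pyRange 0 ((nodemap.map (·.1)).length : Int) 1).map (fun _ => (0 : Int))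
      = List.replicate (pvSkeys nodemap).length 0 := by
    rw [PySem.List.pyRange_one, List.map_map]
    have hc : ((fun _ : Int => (0 : Int)) ∘ fun k : Nat => 0 + (k : Int)) = fun _ => (0 : Int) := rfl
    rw [hc, List.map_const', List.length_range]
    congr 1
    simp [pvSkeys, PySem.List.length_sorted]
  have h0 : (List.foldl (fun d k => d.insert k (List.replicate (pvSkeys nodemap).length (0 : Int)))
        PySem.Dict.empty (pvSkeys nodemap)).items
      = (pvSkeys nodemap).map (fun k => (k, List.replicate (pvSkeys nodemap).length (0 : Int))) := by
    rw [PySem.Dict.items_foldl_insert_fresh (pvSkeys nodemap) (fun k => k) _ PySem.Dict.empty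
        (fun a _ => PySem.Dict.contains_empty a) (by simpa using hnd)]
    simp [PySem.Dict.empty]
  show (List.foldl (fun (d : PySem.Dict String (List Int)) (k1 : String) =>
        (PySem.List.enumerate (pvSkeys nodemap) 0).foldl
        (fun (d : PySem.Dict String (List Int)) (jk : Int × String) =>
          if jk.2 ∈ pvNbrs nodemap k1 then
            d.modify k1 [] (fun row => row.set jk.1.toNat 1)
          else d) d)
      (List.foldl (fun d k => d.insert k
          ((PySem.List.pyRange 0 ((nodemap.map (fun x : String × List String => x.1)).length : Int) 1).map
            (fun _ => (0 : Int))))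
        PySem.Dict.empty (pvSkeys nodemap))
      (pvSkeys nodemap)).items = _
  rw [hrow0]
  have hkeys0 : (List.foldl (fun d k => d.insert k (List.replicate (pvSkeys nodemap).length (0 : Int)))
      PySem.Dict.empty (pvSkeys nodemap)).keys = pvSkeys nodemap := by
    show (List.foldl (fun d k => d.insert k (List.replicate (pvSkeys nodemap).length (0 : Int)))
      PySem.Dict.empty (pvSkeys nodemap)).items.map (fun p => p.1) = _
    rw [h0, List.map_map]
    exact List.map_id _
  have hcont0 : ∀ k ∈ pvSkeys nodemap,
      (List.foldl (fun d k => d.insert k (List.replicate (pvSkeys nodemap).length (0 : Int)))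
        PySem.Dict.empty (pvSkeys nodemap)).contains k = true := by
    intro k hk
    rw [PySem.Dict.contains_iff_mem_keys, hkeys0]
    exact hk
  obtain ⟨hget, hkeysF⟩ := pvOuterD (fun k1 k2 => k2 ∈ pvNbrs nodemap k1)
      (PySem.List.enumerate (pvSkeys nodemap) 0) (pvSkeys nodemap) _ hnd hcont0
  rw [PySem.Dict.items_eq_map_keys _ (by rw [hkeysF, hkeys0]; exact hnd) []]
  rw [hkeysF, hkeys0]
  apply List.map_congr_left
  intro k hk
  rw [hget k, if_pos hk]
  have hD0 : (List.foldl (fun d k => d.insert k (List.replicate (pvSkeys nodemap).length (0 : Int)))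
      PySem.Dict.empty (pvSkeys nodemap)).getD k [] = List.replicate (pvSkeys nodemap).length (0 : Int) := by
    apply PySem.Dict.getD_of_mem_items
    · rw [h0]
      exact List.mem_map.mpr ⟨k, hk, rfl⟩
    · rw [hkeys0]; exact hnd
  rw [hD0]

-- ===== VERDICT (by name: the statement is the Claim_ definition above) =====
theorem maptodictmat_spec : Claim_equal_maptodictmat := by
  intro nodemap _ hpre
  unfold Spec_maptodictmat
  have hnd : (pvSkeys nodemap).Nodup := (PySem.List.sorted_perm _ _ _).nodup_iff.mpr hpre
  rw [pvAeq nodemap hpre, pvBeq nodemap hnd]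
  exact List.map_congr_left (fun k _ => by rw [pvRowEq nodemap hnd k])
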